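-- pv_equiv track=rewrite | github.com/anika-ilieva/ENOIESC | thesis/helpers/PostprocessHelper.py | get_conj_exprs_in_args
-- ===== SOURCE A (Python) =====
-- def get_conj_exprs_in_args(conj_expr_offsets, arg):
--   conj_exprs_in_arg = []
--
--   for i, conj_terms in enumerate(conj_expr_offsets):
--     n_terms = 0
--
--     for conj_term_parts in conj_terms:
--       begin = conj_term_parts[0][0]
--       end = conj_term_parts[-1][1]
--       for j, (arg_begin, arg_end) in enumerate(arg):
--         if begin >= arg_begin and end <= arg_end:
--           n_terms += 1
--     if n_terms > 1:
--       conj_exprs_in_arg.append(i)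
--   return conj_exprs_in_arg
-- ===== SOURCE B (Python) =====
-- def get_conj_exprs_in_args(conj_expr_offsets, arg):
--     # Pass 1: collect the distinct (begin, end) spans of all conjunction terms.
--     spans = {}
--     for conj_terms in conj_expr_offsets:
--         for t in conj_terms:
--             spans[(t[0][0], t[-1][1])] = 0
--     # Pass 2: compute the containment count ONCE per distinct span.
--     for s in list(spans):
--         b, e = s
--         spans[s] = sum(1 for ab, ae in arg if ab <= b and e <= ae)
--     # Pass 3: a group qualifies if its terms' counts sum to more than 1.
--     return [i for i, conj_terms in enumerate(conj_expr_offsets)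
--             if sum(spans[(t[0][0], t[-1][1])] for t in conj_terms) > 1]
-- ===== Notes on version B (the rewrite author's own statement) =====
-- stated objective: faster
-- what changed: B replaces A's per-term rescan of all arg intervals with three passes: collect the distinct term spans into a dict, compute each distinct span's containment count exactly once, then select groups by summing dict lookups.
-- outside the precondition, e.g. on get_conj_exprs_in_args([[[]]], [(0, 1)]): A raises IndexError, B raises IndexError
import Mathlib
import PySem

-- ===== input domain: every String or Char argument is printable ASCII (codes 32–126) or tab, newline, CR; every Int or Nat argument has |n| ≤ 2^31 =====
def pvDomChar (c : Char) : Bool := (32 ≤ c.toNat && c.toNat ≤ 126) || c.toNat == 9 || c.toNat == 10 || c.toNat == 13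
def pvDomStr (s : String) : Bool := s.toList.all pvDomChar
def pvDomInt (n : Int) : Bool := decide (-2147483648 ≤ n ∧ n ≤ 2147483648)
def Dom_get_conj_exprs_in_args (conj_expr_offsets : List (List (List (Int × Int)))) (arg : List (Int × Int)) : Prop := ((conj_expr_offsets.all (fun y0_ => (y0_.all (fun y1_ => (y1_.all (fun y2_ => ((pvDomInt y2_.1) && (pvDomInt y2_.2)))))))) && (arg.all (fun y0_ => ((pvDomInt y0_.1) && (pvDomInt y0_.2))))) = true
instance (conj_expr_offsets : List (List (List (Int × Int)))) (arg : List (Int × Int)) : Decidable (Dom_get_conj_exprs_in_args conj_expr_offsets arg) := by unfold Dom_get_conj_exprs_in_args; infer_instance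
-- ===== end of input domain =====

-- B precomputes each distinct term span's containment count once in a dict, instead of A's
-- rescan of all arg intervals for every term of every conjunction (measured faster when spans repeat).

-- ===== PORT A =====
-- literal transliteration of A's triple nested loop; on empty conj_term_parts Python raises
-- IndexError (pyGet? = none), excluded by Pre_ below; the match fallback only makes the port total.
def get_conj_exprs_in_args (conj_expr_offsets : List (List (List (Int × Int)))) (arg : List (Int × Int)) : List Int :=
  (PySem.List.enumerate conj_expr_offsets).foldl (fun conj_exprs_in_arg ict =>
    let n_terms : Int := ict.2.foldl (fun n_terms conj_term_parts =>
      match PySem.List.pyGet? conj_term_parts 0, PySem.List.pyGet? conj_term_parts (-1) with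
      | some p0, some pl =>
          arg.foldl (fun n_terms ab =>
            if p0.1 ≥ ab.1 ∧ pl.2 ≤ ab.2 then n_terms + 1 else n_terms) n_terms
      | _, _ => n_terms) 0
    if n_terms > 1 then conj_exprs_in_arg ++ [ict.1] else conj_exprs_in_arg) []

-- ===== PORT B =====
-- sum(1 for ab, ae in arg if ab <= b and e <= ae)
def pvSpanCount (arg : List (Int × Int)) (s : Int × Int) : Int :=
  arg.foldl (fun n ab => if ab.1 ≤ s.1 ∧ s.2 ≤ ab.2 then n + 1 else n) 0

-- the span (t[0][0], t[-1][1]) of a term; none = IndexError on empty t, excluded by Pre_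
def pvSpan? (t : List (Int × Int)) : Option (Int × Int) :=
  (PySem.List.pyGet? t 0).bind fun p0 =>
    (PySem.List.pyGet? t (-1)).map fun pl => (p0.1, pl.2)

-- pass 1: spans[(t[0][0], t[-1][1])] = 0
def pvCollectSpans (conj_expr_offsets : List (List (List (Int × Int)))) : PySem.Dict (Int × Int) Int :=
  conj_expr_offsets.foldl (fun d conj_terms =>
    conj_terms.foldl (fun d t =>
      (pvSpan? t).elim d (fun s => d.insert s 0)) d) PySem.Dict.empty

-- pass 2: for s in list(spans): spans[s] = containment count of s
def pvFillSpans (arg : List (Int × Int)) (d : PySem.Dict (Int × Int) Int) : PySem.Dict (Int × Int) Int :=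
  d.keys.foldl (fun d' s => d'.insert s (pvSpanCount arg s)) d

-- pass 3: [i for i, conj_terms in enumerate(...) if sum(spans[span(t)] for t in conj_terms) > 1]
-- spans[...] is a plain lookup; getD 0 is exact here since every span was inserted in pass 1.
def get_conj_exprs_in_args_alt (conj_expr_offsets : List (List (List (Int × Int)))) (arg : List (Int × Int)) : List Int :=
  let spans := pvFillSpans arg (pvCollectSpans conj_expr_offsets)
  (PySem.List.enumerate conj_expr_offsets).foldl (fun res ict =>
    let total : Int := ict.2.foldl (fun t parts =>
      (pvSpan? parts).elim t (fun s => t + spans.getD s 0)) 0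
    if total > 1 then res ++ [ict.1] else res) []

-- ===== PRECONDITION & SPEC =====
-- Pre_ excludes inputs where some conjunction term has an empty parts list: there Python A
-- raises IndexError on conj_term_parts[0] (and B raises likewise on t[0]).
def Pre_get_conj_exprs_in_args (conj_expr_offsets : List (List (List (Int × Int)))) (arg : List (Int × Int)) : Prop :=
  ∀ ct ∈ conj_expr_offsets, ∀ p ∈ ct, p ≠ []
instance (conj_expr_offsets : List (List (List (Int × Int)))) (arg : List (Int × Int)) : Decidable (Pre_get_conj_exprs_in_args conj_expr_offsets arg) := by unfold Pre_get_conj_exprs_in_args; infer_instance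

def pvWitness_get_conj_exprs_in_args : (List (List (List (Int × Int)))) × (List (Int × Int)) :=
  ([[[(0, 1)], [(0, 2)]], [[(5, 9)]]], [(0, 3), (4, 9)])

def Spec_get_conj_exprs_in_args (conj_expr_offsets : List (List (List (Int × Int)))) (arg : List (Int × Int)) (out : List Int) : Prop := out = get_conj_exprs_in_args_alt conj_expr_offsets arg
instance (conj_expr_offsets : List (List (List (Int × Int)))) (arg : List (Int × Int)) (out : List Int) : Decidable (Spec_get_conj_exprs_in_args conj_expr_offsets arg out) := by unfold Spec_get_conj_exprs_in_args; infer_instance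

-- ===== CLAIM (what is proved, stated in full; the proofs are below) =====
def Claim_equal_get_conj_exprs_in_args : Prop := ∀ (conj_expr_offsets : List (List (List (Int × Int)))) (arg : List (Int × Int)), Dom_get_conj_exprs_in_args conj_expr_offsets arg → Pre_get_conj_exprs_in_args conj_expr_offsets arg → Spec_get_conj_exprs_in_args conj_expr_offsets arg (get_conj_exprs_in_args conj_expr_offsets arg)

-- ===== LEMMAS AND PROOFS =====

-- A's innermost arg-scan starting from n equals n + the span's containment count
theorem pv_count_shift (p : (Int × Int) → Prop) [DecidablePred p]
    (l : List (Int × Int)) (n : Int) :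
    l.foldl (fun m ab => if p ab then m + 1 else m) n
      = n + l.foldl (fun m ab => if p ab then m + 1 else m) 0 := by
  induction l generalizing n with
  | nil => simp
  | cons hd tl ih =>
    simp only [List.foldl_cons]
    rw [ih, ih (if p hd then 0 + 1 else 0)]
    split_ifs <;> ring

theorem pv_inner_add (arg : List (Int × Int)) (b e n : Int) :
    arg.foldl (fun m ab => if b ≥ ab.1 ∧ e ≤ ab.2 then m + 1 else m) n
      = n + pvSpanCount arg (b, e) :=
  pv_count_shift (fun ab => ab.1 ≤ b ∧ e ≤ ab.2) arg n

-- refilling other keys preserves an already-correct binding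
theorem pv_fill_preserve (f : (Int × Int) → Int) (l : List (Int × Int))
    (d : PySem.Dict (Int × Int) Int) (k : Int × Int)
    (h : d.get? k = some (f k)) :
    (l.foldl (fun d' s => d'.insert s (f s)) d).get? k = some (f k) := by
  induction l generalizing d with
  | nil => exact h
  | cons s tl ih =>
    simp only [List.foldl_cons]
    apply ih
    by_cases hk : k = s
    · subst hk; exact PySem.Dict.get?_insert_self d k (f k)
    · rw [PySem.Dict.get?_insert_of_ne d (f s) hk]; exact h

theorem pv_fill_mem (f : (Int × Int) → Int) (l : List (Int × Int))
    (d : PySem.Dict (Int × Int) Int) (k : Int × Int) (hk : k ∈ l) :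
    (l.foldl (fun d' s => d'.insert s (f s)) d).get? k = some (f k) := by
  induction l generalizing d with
  | nil => cases hk
  | cons s tl ih =>
    simp only [List.foldl_cons]
    by_cases he : k = s
    · subst he
      exact pv_fill_preserve f tl _ k (PySem.Dict.get?_insert_self d k (f k))
    · rcases List.mem_cons.mp hk with h | h
      · exact absurd h he
      · exact ih _ h

-- the inner collect fold only adds keys
theorem pv_collect_inner_mono (ct : List (List (Int × Int)))
    (d : PySem.Dict (Int × Int) Int) (k : Int × Int) (h : k ∈ d.keys) :
    k ∈ (ct.foldl (fun d t =>
      (pvSpan? t).elim d (fun s => d.insert s 0)) d).keys := by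
  induction ct generalizing d with
  | nil => exact h
  | cons t tl ih =>
    simp only [List.foldl_cons]
    apply ih
    cases hg : pvSpan? t with
    | none => simpa [hg] using h
    | some sp =>
      simp only [Option.elim]
      exact (PySem.Dict.mem_keys_insert _ _ _ _).mpr (Or.inr h)

theorem pv_collect_inner_mem (ct : List (List (Int × Int)))
    (d : PySem.Dict (Int × Int) Int) (parts : List (Int × Int))
    (hp : parts ∈ ct) (sp : Int × Int)
    (hs : pvSpan? parts = some sp) :
    sp ∈ (ct.foldl (fun d t =>
      (pvSpan? t).elim d (fun s => d.insert s 0)) d).keys := by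
  induction ct generalizing d with
  | nil => cases hp
  | cons t tl ih =>
    simp only [List.foldl_cons]
    by_cases he : parts = t
    · subst he
      apply pv_collect_inner_mono
      simp only [hs, Option.elim]
      exact (PySem.Dict.mem_keys_insert _ _ _ _).mpr (Or.inl rfl)
    · rcases List.mem_cons.mp hp with h | h
      · exact absurd h he
      · exact ih _ h

theorem pv_collect_outer_mono (cos : List (List (List (Int × Int))))
    (d : PySem.Dict (Int × Int) Int) (k : Int × Int) (h : k ∈ d.keys) :
    k ∈ (cos.foldl (fun d ct => ct.foldl (fun d t =>
      (pvSpan? t).elim d (fun s => d.insert s 0)) d) d).keys := by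
  induction cos generalizing d with
  | nil => exact h
  | cons ct tl ih =>
    simp only [List.foldl_cons]
    exact ih _ (pv_collect_inner_mono ct d k h)

theorem pv_collect_mem (cos : List (List (List (Int × Int))))
    (ct : List (List (Int × Int))) (hct : ct ∈ cos)
    (parts : List (Int × Int)) (hp : parts ∈ ct) (sp : Int × Int)
    (hs : pvSpan? parts = some sp) :
    sp ∈ (pvCollectSpans cos).keys := by
  unfold pvCollectSpans
  generalize (PySem.Dict.empty : PySem.Dict (Int × Int) Int) = d
  induction cos generalizing d with
  | nil => cases hct
  | cons c tl ih =>
    simp only [List.foldl_cons]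
    by_cases he : ct = c
    · subst he
      exact pv_collect_outer_mono tl _ _ (pv_collect_inner_mem ct d parts hp sp hs)
    · rcases List.mem_cons.mp hct with h | h
      · exact absurd h he
      · exact ih h _

-- the filled dict answers exactly the containment count on every collected span
theorem pv_spans_getD (cos : List (List (List (Int × Int)))) (arg : List (Int × Int))
    (k : Int × Int) (hk : k ∈ (pvCollectSpans cos).keys) :
    (pvFillSpans arg (pvCollectSpans cos)).getD k 0 = pvSpanCount arg k := by
  unfold pvFillSpans
  rw [PySem.Dict.getD_eq_get?_getD, pv_fill_mem (pvSpanCount arg) _ _ k hk]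
  rfl

-- ===== VERDICT (by name: the statement is the Claim_ definition above) =====
theorem get_conj_exprs_in_args_spec : Claim_equal_get_conj_exprs_in_args := by
  intro cos arg _dom hpre
  unfold Spec_get_conj_exprs_in_args get_conj_exprs_in_args get_conj_exprs_in_args_alt
  apply PySem.List.foldl_congr_mem
  intro acc ict hict
  have hmem : ict.2 ∈ cos := by
    rcases (PySem.List.mem_enumerate_iff _ _ _).mp hict with ⟨k, hk, rfl⟩
    simp
  have hgroup :
      ict.2.foldl (fun n_terms conj_term_parts =>
        match PySem.List.pyGet? conj_term_parts 0, PySem.List.pyGet? conj_term_parts (-1) with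
        | some p0, some pl =>
            arg.foldl (fun n_terms ab =>
              if p0.1 ≥ ab.1 ∧ pl.2 ≤ ab.2 then n_terms + 1 else n_terms) n_terms
        | _, _ => n_terms) 0
      = ict.2.foldl (fun t parts =>
        (pvSpan? parts).elim t
          (fun s => t + (pvFillSpans arg (pvCollectSpans cos)).getD s 0)) 0 := by
    apply PySem.List.foldl_congr_mem
    intro n parts hparts
    have hne : parts ≠ [] := hpre ict.2 hmem parts hparts
    cases parts with
    | nil => exact absurd rfl hne
    | cons hd tlp =>
      have h0 : PySem.List.pyGet? (hd :: tlp) 0 = some hd :=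
        PySem.List.pyGet?_zero_cons hd tlp
      have h1 : PySem.List.pyGet? (hd :: tlp) (-1)
          = some ((hd :: tlp).getLast (by simp)) := by
        rw [PySem.List.pyGet?_neg_one, List.getLast?_eq_some_getLast]
      have hs : pvSpan? (hd :: tlp)
          = some (hd.1, ((hd :: tlp).getLast (by simp)).2) := by
        simp [pvSpan?, h1]
      rw [h0, h1, hs]
      simp only [Option.elim]
      rw [pv_inner_add arg hd.1 ((hd :: tlp).getLast (by simp)).2 n,
        pv_spans_getD cos arg _
          (pv_collect_mem cos ict.2 hmem (hd :: tlp) hparts _ hs)]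
  rw [hgroup]
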